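-- pv_equiv track=rewrite | github.com/brunomunizaf/sistouche | calculations.py | calcular_max_caixas_por_embalagem
-- ===== SOURCE A (Python) =====
-- from itertools import permutations
--
-- def calcular_max_caixas_por_embalagem(largura, altura, profundidade):
--     """Calcula o número máximo de caixas que cabem na embalagem 50x35x35"""
--     # Dimensões da caixa de papelão ondulado
--     embalagem_largura = 50
--     embalagem_altura = 35
--     embalagem_profundidade = 35
--
--     # Verificar se alguma dimensão da caixa é maior que a dimensão correspondente da embalagem
--     # (considerando todas as rotações possíveis)
--     caixa_dims = [largura, altura, profundidade]
--     embalagem_dims = [embalagem_largura, embalagem_altura, embalagem_profundidade]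
--
--     # Verificar se a caixa cabe em alguma rotação
--     cabe_em_alguma_rotacao = False
--     for dims in permutations(caixa_dims):
--         l, a, p = dims
--         if l <= embalagem_largura and a <= embalagem_altura and p <= embalagem_profundidade:
--             cabe_em_alguma_rotacao = True
--             break
--
--     # Se não cabe em nenhuma rotação, retorna 0
--     if not cabe_em_alguma_rotacao:
--         return 0
--
--     max_caixas = 0
--
--     # Testar todas as 6 rotações possíveis (3! = 6)
--     for dims in permutations(caixa_dims):
--         l, a, p = dims
--
--         # Calcular quantas caixas cabem em cada direção
--         num_largura = embalagem_largura // l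
--         num_altura = embalagem_altura // a
--         num_profundidade = embalagem_profundidade // p
--
--         # Total de caixas para esta rotação
--         total_esta_rotacao = num_largura * num_altura * num_profundidade
--
--         if total_esta_rotacao > max_caixas:
--             max_caixas = total_esta_rotacao
--
--     return max_caixas
-- ===== SOURCE B (Python) =====
-- def calcular_max_caixas_por_embalagem(largura, altura, profundidade):
--     """Calcula o numero maximo de caixas que cabem na embalagem 50x35x35."""
--     # Fit test: sorted box dims component-wise against sorted package dims [35, 35, 50].
--     _, s1, s2 = sorted((largura, altura, profundidade))
--     if s1 > 35 or s2 > 50: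
--         return 0
--     # The two 35-bounds are interchangeable, so only 3 of the 6 rotations are distinct:
--     # pick which dimension faces the 50-side.
--     best = 0
--     for x, y, z in ((largura, altura, profundidade),
--                     (altura, profundidade, largura),
--                     (profundidade, largura, altura)):
--         t = (50 // x) * (35 // y) * (35 // z)
--         if t > best:
--             best = t
--     return best
-- ===== Notes on version B (the rewrite author's own statement) =====
-- stated objective: simpler
-- what changed: The existence-check loop over 6 permutations is replaced by one sorted-componentwise comparison against [35,35,50], and the 6-rotation max loop is replaced by a 3-rotation loop that only chooses which dimension faces the 50-side (the two 35-bounds are interchangeable).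
import Mathlib
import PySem

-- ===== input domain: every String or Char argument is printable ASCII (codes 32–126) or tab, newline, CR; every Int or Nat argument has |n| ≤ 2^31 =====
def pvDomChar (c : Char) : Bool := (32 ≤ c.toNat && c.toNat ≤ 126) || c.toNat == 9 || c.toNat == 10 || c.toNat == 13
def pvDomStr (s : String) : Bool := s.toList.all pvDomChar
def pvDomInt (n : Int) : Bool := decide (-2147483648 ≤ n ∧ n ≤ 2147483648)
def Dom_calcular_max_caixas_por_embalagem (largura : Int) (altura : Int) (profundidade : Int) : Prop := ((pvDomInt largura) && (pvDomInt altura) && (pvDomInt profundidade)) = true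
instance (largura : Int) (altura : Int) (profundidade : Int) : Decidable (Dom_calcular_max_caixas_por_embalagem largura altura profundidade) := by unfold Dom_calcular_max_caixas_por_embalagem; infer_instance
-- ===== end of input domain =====

-- B replaces the 6-permutation existence check by a sorted-componentwise comparison and the
-- 6-rotation max loop by a 3-rotation loop (the two 35-bounds are interchangeable): simpler.


-- ===== PORT A =====
-- itertools.permutations([l, a, p]) in Python's order, written out as the literal 6-element list.
def pvPermsA (l a p : Int) : List (Int × Int × Int) :=
  [(l, a, p), (l, p, a), (a, l, p), (a, p, l), (p, l, a), (p, a, l)]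

def calcular_max_caixas_por_embalagem (largura : Int) (altura : Int) (profundidade : Int) : Int :=
  -- first loop: flag + break ≡ any over the permutations in order
  let cabe : Bool := (pvPermsA largura altura profundidade).any
    (fun d => decide (d.1 ≤ 50) && decide (d.2.1 ≤ 35) && decide (d.2.2 ≤ 35))
  if cabe = false then 0
  else
    -- second loop: running maximum over the 6 rotations
    (pvPermsA largura altura profundidade).foldl
      (fun max_caixas d =>
        let t := PySem.Int.floordiv 50 d.1 * PySem.Int.floordiv 35 d.2.1 * PySem.Int.floordiv 35 d.2.2
        if t > max_caixas then t else max_caixas) 0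

-- ===== PORT B =====
def calcular_max_caixas_por_embalagem_alt (largura : Int) (altura : Int) (profundidade : Int) : Int :=
  match PySem.List.sorted [largura, altura, profundidade] (fun x => x) false with
  | [_, s1, s2] =>
    if s1 > 35 ∨ s2 > 50 then 0
    else
      [(largura, altura, profundidade), (altura, profundidade, largura), (profundidade, largura, altura)].foldl
        (fun best d =>
          let t := PySem.Int.floordiv 50 d.1 * PySem.Int.floordiv 35 d.2.1 * PySem.Int.floordiv 35 d.2.2
          if t > best then t else best) 0
  | _ => 0  -- unreachable: sorted of a 3-element list has 3 elements

-- ===== PRECONDITION & SPEC =====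
-- Pre_ excludes exactly the inputs where Python A raises ZeroDivisionError: a dimension equal to 0
-- while the box passes the rotation fit check (A returns normally on every other input).
def Pre_calcular_max_caixas_por_embalagem (largura : Int) (altura : Int) (profundidade : Int) : Prop :=
  (largura = 0 ∨ altura = 0 ∨ profundidade = 0) →
    ¬ ((altura ≤ 35 ∧ profundidade ≤ 35 ∧ largura ≤ 50) ∨
       (largura ≤ 35 ∧ profundidade ≤ 35 ∧ altura ≤ 50) ∨
       (largura ≤ 35 ∧ altura ≤ 35 ∧ profundidade ≤ 50))
instance (largura : Int) (altura : Int) (profundidade : Int) : Decidable (Pre_calcular_max_caixas_por_embalagem largura altura profundidade) := by unfold Pre_calcular_max_caixas_por_embalagem; infer_instance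

def pvWitness_calcular_max_caixas_por_embalagem : Int × Int × Int := (10, 10, 10)

def Spec_calcular_max_caixas_por_embalagem (largura : Int) (altura : Int) (profundidade : Int) (out : Int) : Prop := out = calcular_max_caixas_por_embalagem_alt largura altura profundidade
instance (largura : Int) (altura : Int) (profundidade : Int) (out : Int) : Decidable (Spec_calcular_max_caixas_por_embalagem largura altura profundidade out) := by unfold Spec_calcular_max_caixas_por_embalagem; infer_instance

-- ===== CLAIM (what is proved, stated in full; the proofs are below) =====
def Claim_equal_calcular_max_caixas_por_embalagem : Prop := ∀ (largura : Int) (altura : Int) (profundidade : Int), Dom_calcular_max_caixas_por_embalagem largura altura profundidade → Pre_calcular_max_caixas_por_embalagem largura altura profundidade → Spec_calcular_max_caixas_por_embalagem largura altura profundidade (calcular_max_caixas_por_embalagem largura altura profundidade)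

-- ===== LEMMAS AND PROOFS =====

-- the running-max step absorbs an immediate duplicate
lemma pvStep_idem (m t : Int) :
    (if t > (if t > m then t else m) then t else (if t > m then t else m)) = (if t > m then t else m) := by
  split_ifs <;> omega

set_option maxHeartbeats 1000000 in
theorem calcular_max_caixas_por_embalagem_spec : Claim_equal_calcular_max_caixas_por_embalagem := by
  intro l a p _ _
  unfold Spec_calcular_max_caixas_por_embalagem
  unfold calcular_max_caixas_por_embalagem calcular_max_caixas_por_embalagem_alt pvPermsA
  rcases le_total l a with h1 | h1 <;> rcases le_total a p with h2 | h2 <;>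
    rcases le_total l p with h3 | h3
  all_goals first
    | rw [PySem.List.sorted_id_eq_of_perm_of_pairwise _ [l, a, p] (List.Perm.refl _)
          (by simp [List.pairwise_cons]; omega)]
    | rw [PySem.List.sorted_id_eq_of_perm_of_pairwise _ [l, p, a]
          (List.Perm.cons l (List.Perm.swap a p [])) (by simp [List.pairwise_cons]; omega)]
    | rw [PySem.List.sorted_id_eq_of_perm_of_pairwise _ [a, l, p]
          (List.Perm.swap l a [p]) (by simp [List.pairwise_cons]; omega)]
    | rw [PySem.List.sorted_id_eq_of_perm_of_pairwise _ [a, p, l]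
          (List.Perm.trans (List.Perm.cons a (List.Perm.swap l p [])) (List.Perm.swap l a [p]))
          (by simp [List.pairwise_cons]; omega)]
    | rw [PySem.List.sorted_id_eq_of_perm_of_pairwise _ [p, l, a]
          (List.Perm.trans (List.Perm.swap l p [a]) (List.Perm.cons l (List.Perm.swap a p [])))
          (by simp [List.pairwise_cons]; omega)]
    | rw [PySem.List.sorted_id_eq_of_perm_of_pairwise _ [p, a, l]
          (List.Perm.trans (List.Perm.swap a p [l])
            (List.Perm.trans (List.Perm.cons a (List.Perm.swap l p [])) (List.Perm.swap l a [p])))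
          (by simp [List.pairwise_cons]; omega)]
  all_goals {
    simp only [List.any_cons, List.any_nil, List.foldl_cons, List.foldl_nil]
    refine if_congr (by simp; omega) rfl ?_
    have e1 : PySem.Int.floordiv 50 l * PySem.Int.floordiv 35 p * PySem.Int.floordiv 35 a
            = PySem.Int.floordiv 50 l * PySem.Int.floordiv 35 a * PySem.Int.floordiv 35 p := mul_right_comm _ _ _
    have e2 : PySem.Int.floordiv 50 a * PySem.Int.floordiv 35 l * PySem.Int.floordiv 35 p
            = PySem.Int.floordiv 50 a * PySem.Int.floordiv 35 p * PySem.Int.floordiv 35 l := mul_right_comm _ _ _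
    have e3 : PySem.Int.floordiv 50 p * PySem.Int.floordiv 35 a * PySem.Int.floordiv 35 l
            = PySem.Int.floordiv 50 p * PySem.Int.floordiv 35 l * PySem.Int.floordiv 35 a := mul_right_comm _ _ _
    simp only [e1, e2, e3]
    rw [pvStep_idem, pvStep_idem, pvStep_idem] }
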